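-- pv_equiv track=rewrite | github.com/BlinkenOSA/clockwork-api | authority/helpers/similarity_helpers.py | simhash64
-- ===== SOURCE A (Python) =====
-- def _trigrams(s: str):
--     """
--     Generates character trigrams with padding.
--
--     Padding preserves edge information so that beginnings and endings
--     of strings influence the hash.
--
--     Example:
--         "abc" → ["  a", " ab", "abc", "bc ", "c  "]
--
--     Args:
--         s: Input string.
--
--     Returns:
--         List of 3-character substrings.
--     """
--
--     s = f"  {s}  "  # padding to keep edges informative
--     return [s[i:i+3] for i in range(len(s) - 2)]
--
-- def _hash64(s: str) -> int:
--     """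
--     Computes a fast, non-cryptographic 64-bit hash of a string.
--
--     This function is inspired by splitmix-style mixing and is designed
--     to be:
--         - fast
--         - stable
--         - evenly distributed
--
--     It is *not* suitable for cryptographic purposes.
--
--     Args:
--         s: Input string.
--
--     Returns:
--         Unsigned 64-bit integer hash.
--     """
--
--     x = 0x9E3779B97F4A7C15
--     h = 0
--     for ch in s:
--         x ^= ord(ch)
--         x = (x * 0xBF58476D1CE4E5B9) & 0xFFFFFFFFFFFFFFFF
--         x ^= (x >> 30)
--         x = (x * 0x94D049BB133111EB) & 0xFFFFFFFFFFFFFFFF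
--         h ^= x
--     return h & 0xFFFFFFFFFFFFFFFF
--
-- def simhash64(s: str) -> int:
--     """
--     Computes a 64-bit SimHash fingerprint for a string.
--
--     Implementation details:
--         - Uses character 3-grams as features
--         - Hashes each trigram with `_hash64`
--         - Aggregates bit votes across all trigrams
--         - Produces a stable 64-bit fingerprint
--
--     Properties:
--         - Similar strings produce similar hashes
--         - Hamming distance approximates string similarity
--         - Extremely fast for large datasets
--
--     Args:
--         s: Input string (already folded/normalized if desired).
--
--     Returns:
--         Unsigned 64-bit SimHash fingerprint.
--     """
--
--     grams = _trigrams(s)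
--     if not grams:
--         return 0
--     bits = [0]*64
--     for g in grams:
--         h = _hash64(g)
--         for i in range(64):
--             bits[i] += 1 if (h >> i) & 1 else -1
--     out = 0
--     for i, val in enumerate(bits):
--         if val >= 0:
--             out |= (1 << i)
--     return out & 0xFFFFFFFFFFFFFFFF
-- ===== SOURCE B (Python) =====
-- def _hash64(s: str) -> int:
--     x = 0x9E3779B97F4A7C15
--     h = 0
--     for ch in s:
--         x ^= ord(ch)
--         x = (x * 0xBF58476D1CE4E5B9) & 0xFFFFFFFFFFFFFFFF
--         x ^= (x >> 30)
--         x = (x * 0x94D049BB133111EB) & 0xFFFFFFFFFFFFFFFF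
--         h ^= x
--     return h & 0xFFFFFFFFFFFFFFFF
--
-- def simhash64(s: str) -> int:
--     padded = "  " + s + "  "
--     counts = {}
--     for i in range(len(padded) - 2):
--         g = padded[i:i+3]
--         counts[g] = counts.get(g, 0) + 1
--     weighted = [(_hash64(g), c) for g, c in counts.items()]
--     out = 0
--     for i in range(64):
--         total = sum(c if (h >> i) & 1 else -c for h, c in weighted)
--         if total >= 0:
--             out |= 1 << i
--     return out & 0xFFFFFFFFFFFFFFFF
-- ===== Notes on version B (the rewrite author's own statement) =====
-- stated objective: faster
-- what changed: B counts trigram multiplicities in a dict and hashes/votes each DISTINCT trigram once with count-weighted bit votes, instead of A's per-occurrence 64-bit vote loop over a mutable bits array.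
import Mathlib
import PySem

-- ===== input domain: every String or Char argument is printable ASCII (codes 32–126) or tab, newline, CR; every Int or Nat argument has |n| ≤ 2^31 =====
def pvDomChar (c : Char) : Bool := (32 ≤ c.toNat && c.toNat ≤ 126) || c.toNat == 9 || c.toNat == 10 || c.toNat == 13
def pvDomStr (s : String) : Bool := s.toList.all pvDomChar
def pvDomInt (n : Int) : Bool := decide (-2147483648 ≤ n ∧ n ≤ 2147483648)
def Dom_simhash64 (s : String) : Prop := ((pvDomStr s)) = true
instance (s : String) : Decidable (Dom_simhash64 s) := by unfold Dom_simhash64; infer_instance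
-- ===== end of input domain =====

-- B replaces A's per-occurrence 64-bit vote loop by a trigram multiplicity counter: each
-- DISTINCT trigram is hashed and voted once, weighted by its count (same return value).

-- shared helper: the splitmix-style 64-bit string hash (identical in Source A and Source B)
def pvHash64 (g : List Char) : Nat :=
  let st := g.foldl (fun (p : Nat × Nat) ch =>
    let x := p.1 ^^^ ch.toNat
    let x := (x * 0xBF58476D1CE4E5B9) &&& 0xFFFFFFFFFFFFFFFF
    let x := x ^^^ (x >>> 30)
    let x := (x * 0x94D049BB133111EB) &&& 0xFFFFFFFFFFFFFFFF
    (x, p.2 ^^^ x)) (0x9E3779B97F4A7C15, 0)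
  st.2 &&& 0xFFFFFFFFFFFFFFFF

-- ===== PORT A =====
-- _trigrams: pad with two spaces on each side, take all 3-slices
def pvTrigrams (s : List Char) : List (List Char) :=
  let t := ' ' :: ' ' :: (s ++ [' ', ' '])
  (PySem.List.pyRange 0 ((t.length : Int) - 2)).map
    (fun i => PySem.List.slice t (some i) (some (i + 3)))

def simhash64 (s : String) : Int :=
  let grams := pvTrigrams s.toList
  if grams = [] then 0 else
    let bits : List Int := List.replicate 64 0
    let bits := grams.foldl (fun bits g =>
      let h := pvHash64 g
      (PySem.List.pyRange 0 64).foldl (fun bits i =>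
        PySem.List.pySetD bits i (PySem.List.pyGetD bits i 0 +
          (if (h >>> i.toNat) &&& 1 = 1 then (1 : Int) else -1))) bits) bits
    let out := (PySem.List.enumerate bits).foldl (fun (out : Nat) p =>
      if p.2 ≥ (0:Int) then out ||| (1 <<< p.1.toNat) else out) 0
    ((out &&& 0xFFFFFFFFFFFFFFFF : Nat) : Int)

-- ===== PORT B =====
def simhash64_alt (s : String) : Int :=
  let padded := ' ' :: ' ' :: (s.toList ++ [' ', ' '])
  let counts := (PySem.List.pyRange 0 ((padded.length : Int) - 2)).foldl
    (fun (d : PySem.Dict (List Char) Int) i =>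
      let g := PySem.List.slice padded (some i) (some (i + 3))
      d.insert g (d.getD g 0 + 1)) PySem.Dict.empty
  let weighted := counts.items.map (fun p => (pvHash64 p.1, p.2))
  let out := (PySem.List.pyRange 0 64).foldl (fun (out : Nat) i =>
      let total := (weighted.map
        (fun p => if (p.1 >>> i.toNat) &&& 1 = 1 then p.2 else -p.2)).sum
      if total ≥ (0:Int) then out ||| (1 <<< i.toNat) else out) 0
  ((out &&& 0xFFFFFFFFFFFFFFFF : Nat) : Int)

-- ===== PRECONDITION & SPEC =====
def Spec_simhash64 (s : String) (out : Int) : Prop := out = simhash64_alt s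
instance (s : String) (out : Int) : Decidable (Spec_simhash64 s out) := by unfold Spec_simhash64; infer_instance

-- ===== CLAIM (what is proved, stated in full; the proofs are below) =====
def Claim_equal_simhash64 : Prop := ∀ (s : String), Dom_simhash64 s → Spec_simhash64 s (simhash64 s)

-- ===== LEMMAS AND PROOFS =====

-- one trigram's vote on bit j
def pvVote (h : Nat) (j : Nat) : Int := if (h >>> j) &&& 1 = 1 then 1 else -1

-- total vote of a list of trigrams on bit j
def pvS (grams : List (List Char)) (j : Nat) : Int :=
  (grams.map (fun g => pvVote (pvHash64 g) j)).sum

lemma pv_set_map_range {β : Type} (G : Nat → β) (m n : Nat) (v : β) :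
    ((List.range m).map G).set n v
      = (List.range m).map (fun j => if j = n then v else G j) := by
  apply List.ext_getElem
  · simp
  · intro i h1 h2
    simp only [List.length_set, List.length_map, List.length_range] at h1
    rw [List.getElem_set]
    simp only [List.getElem_map, List.getElem_range]
    split_ifs with h h' h'
    · rfl
    · omega
    · omega
    · rfl

lemma pv_inner (h : Nat) (n : Nat) (hn : n ≤ 64) (F : Nat → Int) :
    (PySem.List.pyRange 0 (n : Int)).foldl (fun bits i =>
        PySem.List.pySetD bits i (PySem.List.pyGetD bits i 0 +
          (if (h >>> i.toNat) &&& 1 = 1 then (1 : Int) else -1))) ((List.range 64).map F)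
      = (List.range 64).map (fun j => if j < n then F j + pvVote h j else F j) := by
  induction n with
  | zero => simp [PySem.List.pyRange]
  | succ n ih =>
    have hn' : n ≤ 64 := by omega
    have hcast : ((n + 1 : Nat) : Int) = (n : Int) + 1 := by push_cast; ring
    rw [hcast, PySem.List.pyRange_one_succ_right (by positivity), List.foldl_append,
      ih hn']
    simp only [List.foldl_cons, List.foldl_nil]
    rw [PySem.List.pyGetD_natCast, PySem.List.getD_map_range _ _ _ _ (by omega),
      PySem.List.pySetD_natCast, pv_set_map_range]
    apply List.map_congr_left
    intro j hj
    have hj64 : j < 64 := List.mem_range.mp hj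
    by_cases hje : j = n
    · subst hje
      simp [pvVote]
    · by_cases hjn : j < n <;> simp [hje, hjn, show j < n + 1 ↔ j < n by omega]

lemma pv_inner64 (h : Nat) (F : Nat → Int) :
    (PySem.List.pyRange 0 64).foldl (fun bits i =>
        PySem.List.pySetD bits i (PySem.List.pyGetD bits i 0 +
          (if (h >>> i.toNat) &&& 1 = 1 then (1 : Int) else -1))) ((List.range 64).map F)
      = (List.range 64).map (fun j => F j + pvVote h j) := by
  have h1 := pv_inner h 64 le_rfl F
  rw [show ((64 : Nat) : Int) = (64 : Int) from by norm_num] at h1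
  rw [h1]
  apply List.map_congr_left
  intro j hj
  simp [List.mem_range.mp hj]

lemma pv_outer (grams : List (List Char)) (F : Nat → Int) :
    grams.foldl (fun bits g =>
        (PySem.List.pyRange 0 64).foldl (fun bits i =>
          PySem.List.pySetD bits i (PySem.List.pyGetD bits i 0 +
            (if (pvHash64 g >>> i.toNat) &&& 1 = 1 then (1 : Int) else -1))) bits)
      ((List.range 64).map F)
      = (List.range 64).map (fun j => F j + pvS grams j) := by
  induction grams generalizing F with
  | nil => simp [pvS]
  | cons g gs ih =>
    rw [List.foldl_cons, pv_inner64 (pvHash64 g) F, ih]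
    apply List.map_congr_left
    intro j _
    simp [pvS, add_assoc]

lemma pv_toFinset_dedup (xs : List (List Char)) :
    (PySem.List.dedup xs).toFinset = xs.toFinset := by
  apply Finset.ext
  intro a
  simp

lemma pv_count_eq (m : List Char) (xs : List (List Char)) :
    @List.count (List Char) (@instBEqOfDecidableEq (List Char) _) m xs = List.count m xs := by
  induction xs with
  | nil => rfl
  | cons x xs ih =>
    rw [@List.count_cons _ (@instBEqOfDecidableEq (List Char) _), List.count_cons, ih]
    by_cases hxm : x = m <;> simp [hxm]

lemma pv_group (xs : List (List Char)) (f : List Char → Int) :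
    ((PySem.List.dedup xs).map (fun g => (xs.count g : Int) * f g)).sum
      = (xs.map f).sum := by
  rw [← List.sum_toFinset _ (PySem.List.nodup_dedup xs), pv_toFinset_dedup,
    Finset.sum_list_map_count]
  apply Finset.sum_congr rfl
  intro m _
  rw [nsmul_eq_mul, pv_count_eq]

-- B's weighted total on bit j equals A's per-occurrence total
lemma pv_total (grams : List (List Char)) (j : Nat) :
    (((PySem.List.dedup grams).map (fun g => (pvHash64 g, (grams.count g : Int)))).map
        (fun p => if (p.1 >>> j) &&& 1 = 1 then p.2 else -p.2)).sum
      = pvS grams j := by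
  rw [List.map_map]
  have : ((fun p : Nat × Int => if (p.1 >>> j) &&& 1 = 1 then p.2 else -p.2) ∘
        (fun g => (pvHash64 g, (grams.count g : Int))))
      = fun g => (grams.count g : Int) * pvVote (pvHash64 g) j := by
    funext g
    simp only [Function.comp, pvVote]
    split_ifs <;> ring
  rw [this, pv_group]
  rfl

set_option maxHeartbeats 1600000 in
theorem simhash64_spec_aux (s : String) : simhash64 s = simhash64_alt s := by
  simp only [simhash64, simhash64_alt, pvTrigrams]
  set t := ' ' :: ' ' :: (s.toList ++ [' ', ' ']) with ht
  set grams := (PySem.List.pyRange 0 ((t.length : Int) - 2)).map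
    (fun i => PySem.List.slice t (some i) (some (i + 3))) with hgrams
  -- grams is never empty: t has length ≥ 4
  have hlen : (4 : Int) ≤ (t.length : Int) := by
    simp [ht]
    omega
  have hne : grams ≠ [] := by
    have h0 : (0 : Int) < (t.length : Int) - 2 := by omega
    rw [hgrams, PySem.List.pyRange_one_cons h0]
    simp
  rw [if_neg hne]
  -- A's bits list
  have hrep : (List.replicate 64 (0 : Int)) = (List.range 64).map (fun _ => (0 : Int)) := by
    simp [List.map_const']
  rw [hrep, pv_outer grams (fun _ => 0)]
  -- B's counter equals counter grams
  have hcnt : (PySem.List.pyRange 0 ((t.length : Int) - 2)).foldl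
      (fun (d : PySem.Dict (List Char) Int) i =>
        let g := PySem.List.slice t (some i) (some (i + 3))
        d.insert g (d.getD g 0 + 1)) PySem.Dict.empty
      = PySem.Dict.counter grams := by
    rw [hgrams, ← PySem.Dict.foldl_insert_getD_add_one_eq_counter, List.foldl_map]
  rw [hcnt, PySem.Dict.items_counter, ← PySem.List.dedup_eq_ofList, List.map_map]
  -- A's out-fold over enumerate = fold over pyRange 0 64
  rw [PySem.List.enumerate_eq_map_pyRange _ (0 : Int), List.foldl_map]
  have hlen64 : PySem.List.len ((List.range 64).map (fun j => (0 : Int) + pvS grams j))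
      = (64 : Int) := by
    simp [PySem.List.len]
  rw [hlen64]
  -- the two 64-step folds agree step by step
  have hfold : (PySem.List.pyRange 0 64).foldl (fun (out : Nat) j =>
        if (PySem.List.pyGetD ((List.range 64).map (fun j => (0 : Int) + pvS grams j)) j 0) ≥ 0
        then out ||| (1 <<< j.toNat) else out) 0
      = (PySem.List.pyRange 0 64).foldl (fun (out : Nat) i =>
        if (((PySem.List.dedup grams).map
              ((fun p : List Char × Int => (pvHash64 p.1, p.2)) ∘
                (fun k => (k, (grams.count k : Int))))).map
            (fun p => if (p.1 >>> i.toNat) &&& 1 = 1 then p.2 else -p.2)).sum ≥ 0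
        then out ||| (1 <<< i.toNat) else out) 0 := by
    apply PySem.List.foldl_congr_mem
    intro acc j hj
    have hjr := PySem.List.mem_pyRange_one.mp hj
    have hj0 : j = ((j.toNat : Nat) : Int) := by omega
    have hget : PySem.List.pyGetD ((List.range 64).map (fun j => (0 : Int) + pvS grams j)) j 0
        = pvS grams j.toNat := by
      rw [hj0, PySem.List.pyGetD_natCast, PySem.List.getD_map_range _ _ _ _ (by omega),
        Int.toNat_natCast]
      ring
    have hcomp : ((fun p : List Char × Int => (pvHash64 p.1, p.2)) ∘
          (fun k : List Char => (k, (grams.count k : Int))))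
        = fun g => (pvHash64 g, (grams.count g : Int)) := rfl
    rw [hget, hcomp, pv_total grams j.toNat]
  exact congrArg (fun o : Nat => ((o &&& 0xFFFFFFFFFFFFFFFF : Nat) : Int)) hfold

-- ===== VERDICT (by name: the statement is the Claim_ definition above) =====
theorem simhash64_spec : Claim_equal_simhash64 := by
  intro s _
  exact simhash64_spec_aux s
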